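-- pv_equiv track=rewrite | github.com/ktawiah/CodePath-DSA | Unit-2/Session-2/Standard_V1/navigate_research_station.py | navigate_research_station
-- ===== SOURCE A (Python) =====
-- def navigate_research_station(station_layout, observations):
--     # Create placeholder for total time
--     total_time = 0
--
--     # Create placeholder for prev pointer
--     prev = 0
--
--     # Iterate through observations
--     for observation in observations:
--
--         # Iterate through station layout
--         for idx2, layout in enumerate(station_layout):
--
--             # Update total time
--             if observation == layout:
--                 total_time += abs(idx2 - prev)
--                 prev = idx2
--
--     # Return total time
--     return total_time
-- ===== SOURCE B (Python) =====
-- def navigate_research_station(station_layout, observations):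
--     # Build once: value -> ordered list of its indices in the layout
--     positions = {}
--     for idx, val in enumerate(station_layout):
--         positions.setdefault(val, []).append(idx)
--
--     total_time = 0
--     prev = 0
--     for observation in observations:
--         for idx in positions.get(observation, []):
--             total_time += abs(idx - prev)
--             prev = idx
--     return total_time
-- ===== Notes on version B (the rewrite author's own statement) =====
-- stated objective: alternative
-- what changed: Pre-scan the layout once into a dict mapping each value to its ordered index list, so the per-observation rescans of the whole layout disappear; cost then depends on the number of matches rather than n*m, but a timing run could not confirm a speedup on the generated (match-heavy) inputs.
import Mathlib
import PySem

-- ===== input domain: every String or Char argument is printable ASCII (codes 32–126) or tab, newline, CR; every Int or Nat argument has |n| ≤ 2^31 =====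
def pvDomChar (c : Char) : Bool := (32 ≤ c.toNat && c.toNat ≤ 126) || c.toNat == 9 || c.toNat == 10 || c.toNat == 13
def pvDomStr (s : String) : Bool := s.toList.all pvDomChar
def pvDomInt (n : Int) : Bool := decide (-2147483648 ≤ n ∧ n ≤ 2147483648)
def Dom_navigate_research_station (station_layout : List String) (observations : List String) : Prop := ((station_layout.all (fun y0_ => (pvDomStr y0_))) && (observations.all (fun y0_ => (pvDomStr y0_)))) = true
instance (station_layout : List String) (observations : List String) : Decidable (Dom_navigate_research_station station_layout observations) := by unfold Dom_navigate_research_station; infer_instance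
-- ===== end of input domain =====

-- B replaces A's per-observation rescans of the layout by one prebuilt value→indices dict (alternative strategy; same result).

-- ===== PORT A =====
def navigate_research_station (station_layout : List String) (observations : List String) : Int :=
  (observations.foldl
    (fun (st : Int × Int) observation =>
      (PySem.List.enumerate station_layout).foldl
        (fun (st : Int × Int) p =>
          if observation == p.2 then (st.1 + |p.1 - st.2|, p.1) else st) st)
    ((0 : Int), (0 : Int))).1

-- ===== PORT B =====
-- positions = {}; for idx, val in enumerate(station_layout): positions.setdefault(val, []).append(idx)
def nrsPositions (station_layout : List String) : PySem.Dict String (List Int) :=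
  (PySem.List.enumerate station_layout).foldl
    (fun d p => d.modify p.2 [] (fun l => l ++ [p.1])) PySem.Dict.empty

def navigate_research_station_alt (station_layout : List String) (observations : List String) : Int :=
  let positions := nrsPositions station_layout
  (observations.foldl
    (fun (st : Int × Int) observation =>
      (positions.getD observation []).foldl
        (fun (st : Int × Int) i => (st.1 + |i - st.2|, i)) st)
    ((0 : Int), (0 : Int))).1

-- ===== PRECONDITION & SPEC =====
def Spec_navigate_research_station (station_layout : List String) (observations : List String) (out : Int) : Prop := out = navigate_research_station_alt station_layout observations
instance (station_layout : List String) (observations : List String) (out : Int) : Decidable (Spec_navigate_research_station station_layout observations out) := by unfold Spec_navigate_research_station; infer_instance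

-- ===== CLAIM (what is proved, stated in full; the proofs are below) =====
def Claim_equal_navigate_research_station : Prop := ∀ (station_layout : List String) (observations : List String), Dom_navigate_research_station station_layout observations → Spec_navigate_research_station station_layout observations (navigate_research_station station_layout observations)

-- ===== LEMMAS AND PROOFS =====

-- B's dict lookup is exactly the ordered list of indices of the observation in the layout
theorem nrsPositions_getD (station_layout : List String) (o : String) :
    (nrsPositions station_layout).getD o []
      = ((PySem.List.enumerate station_layout).filter (fun p => o == p.2)).map (·.1) := by
  unfold nrsPositions
  have h : (PySem.List.enumerate station_layout).foldl
        (fun d p => d.modify p.2 [] (fun l => l ++ [p.1])) PySem.Dict.empty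
      = ((PySem.List.enumerate station_layout).map (fun p => (p.2, p.1))).foldl
        (fun d q => d.modify q.1 [] (fun l => l ++ [q.2])) PySem.Dict.empty := by
    rw [List.foldl_map]
  rw [h]
  rw [PySem.Dict.getD_foldl_modify_append]
  simp [List.filter_map, Function.comp_def, BEq.comm]

-- the inner loops agree for every observation and every carried state
theorem nrs_inner (station_layout : List String) (o : String) (st : Int × Int) :
    (PySem.List.enumerate station_layout).foldl
      (fun (st : Int × Int) p => if o == p.2 then (st.1 + |p.1 - st.2|, p.1) else st) st
    = ((nrsPositions station_layout).getD o []).foldl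
      (fun (st : Int × Int) i => (st.1 + |i - st.2|, i)) st := by
  rw [nrsPositions_getD, List.foldl_map, ← List.foldl_filter]

-- ===== VERDICT (by name: the statement is the Claim_ definition above) =====
theorem navigate_research_station_spec : Claim_equal_navigate_research_station := by
  intro station_layout observations _
  unfold Spec_navigate_research_station navigate_research_station navigate_research_station_alt
  congr 2
  funext st o
  exact nrs_inner station_layout o st
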